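-- pv_equiv track=rewrite | github.com/Grozby/out-loud | advent_of_code/2024/day12.py | fence_price
-- ===== SOURCE A (Python) =====
-- def fence_price(
--     _map: list[list[str]],
--     pos: tuple[int, int],
--     explored: dict[tuple, set],
--     plot_type: str,
-- ) -> dict[tuple, set]:
--     possible_positions = []
--     explored[pos] = set()
--     for dx, dy in all_directions():
--         p = (pos[0] + dx, pos[1] + dy)
--         if is_inside(_map, p) and _map[p[0]][p[1]] == plot_type:
--             possible_positions.append(p)
--         else:
--             explored[pos].add((dx, dy))
--
--     for p in possible_positions:
--         if p not in explored:
--             fence_price(_map, pos=p, explored=explored, plot_type=plot_type)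
--
--     return explored
--
-- def is_inside(_map: list[list[str]], pos: tuple[int, int]) -> bool:
--     return 0 <= pos[0] < len(_map) and 0 <= pos[1] < len(_map[0])
--
-- def all_directions() -> list[tuple[int, int]]:
--     return [
--         (-1, 0),
--         (+1, 0),
--         (0, -1),
--         (0, +1),
--     ]
-- ===== SOURCE B (Python) =====
-- # Iterative flood fill with an explicit stack (same result and insertion order as
-- # the recursive version; mutates `explored` in place just like A and returns it).
-- def all_directions():
--     return [
--         (-1, 0),
--         (+1, 0),
--         (0, -1),
--         (0, +1),
--     ]
--
--
-- def is_inside(_map, pos):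
--     return 0 <= pos[0] < len(_map) and 0 <= pos[1] < len(_map[0])
--
--
-- def fence_price(_map, pos, explored, plot_type):
--     def same(q):
--         return is_inside(_map, q) and _map[q[0]][q[1]] == plot_type
--
--     stack = [pos]
--     while stack:
--         p = stack.pop()
--         if p in explored:
--             continue
--         explored[p] = {d for d in all_directions() if not same((p[0] + d[0], p[1] + d[1]))}
--         stack.extend(reversed([(p[0] + d[0], p[1] + d[1]) for d in all_directions() if same((p[0] + d[0], p[1] + d[1]))]))
--     return explored
-- ===== Notes on version B (the rewrite author's own statement) =====
-- stated objective: alternative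
-- what changed: Replaced the recursive flood fill (per-cell recursion guarded by membership checks) with an iterative DFS over an explicit stack that skips already-explored cells at pop time and computes each cell's neighbour list and border set with comprehensions; pushing neighbours in reverse keeps the dict insertion order identical.
import Mathlib
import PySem

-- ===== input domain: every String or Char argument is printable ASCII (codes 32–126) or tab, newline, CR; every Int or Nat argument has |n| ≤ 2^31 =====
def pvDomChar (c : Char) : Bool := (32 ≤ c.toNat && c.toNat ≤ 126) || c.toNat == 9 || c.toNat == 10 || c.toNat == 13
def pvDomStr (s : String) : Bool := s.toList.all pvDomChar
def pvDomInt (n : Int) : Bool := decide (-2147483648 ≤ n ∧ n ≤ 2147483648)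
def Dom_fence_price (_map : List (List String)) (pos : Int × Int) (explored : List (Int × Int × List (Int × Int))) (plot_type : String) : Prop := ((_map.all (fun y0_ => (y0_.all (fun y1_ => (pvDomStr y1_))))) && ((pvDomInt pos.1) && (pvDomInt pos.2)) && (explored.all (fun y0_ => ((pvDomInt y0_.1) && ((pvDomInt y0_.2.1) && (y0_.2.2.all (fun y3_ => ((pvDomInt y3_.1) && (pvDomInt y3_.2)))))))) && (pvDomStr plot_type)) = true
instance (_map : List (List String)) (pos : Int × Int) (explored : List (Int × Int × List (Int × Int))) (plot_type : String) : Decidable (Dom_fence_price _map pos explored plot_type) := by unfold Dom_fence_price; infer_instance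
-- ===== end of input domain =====

-- B replaces the recursive flood fill by an iterative DFS over an explicit stack (same
-- result, incl. dict insertion order); both versions mutate `explored` in place in Python —
-- the equivalence proved here is about the returned dict (which IS that mutated argument).

-- The Python dict[tuple, set] arrives flattened as a List of (i, j, value) triples, so the
-- dict primitives (first-match lookup, overwrite-in-place insert, modify) are written out
-- here over that representation; they are exact for Python dicts (whose key lists are
-- duplicate-free, as Pre_ records).
def dContains (e : List (Int × Int × List (Int × Int))) (k : Int × Int) : Bool :=
  e.any (fun r => decide (r.1 = k.1 ∧ r.2.1 = k.2))

def dInsert (e : List (Int × Int × List (Int × Int))) (k : Int × Int) (v : List (Int × Int)) :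
    List (Int × Int × List (Int × Int)) :=
  match e with
  | [] => [(k.1, k.2, v)]
  | r :: rs => if r.1 = k.1 ∧ r.2.1 = k.2 then (k.1, k.2, v) :: rs else r :: dInsert rs k v

def dModify (e : List (Int × Int × List (Int × Int))) (k : Int × Int)
    (f : List (Int × Int) → List (Int × Int)) : List (Int × Int × List (Int × Int)) :=
  match e with
  | [] => []
  | r :: rs => if r.1 = k.1 ∧ r.2.1 = k.2 then (r.1, r.2.1, f r.2.2) :: rs else r :: dModify rs k f

-- module helpers of the Python file (used by both A and B)
def fpDirs : List (Int × Int) := [(-1, 0), (1, 0), (0, -1), (0, 1)]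

def fpInside (m : List (List String)) (p : Int × Int) : Bool :=
  (decide (0 ≤ p.1) && decide (p.1 < (m.length : Int))) &&
  (decide (0 ≤ p.2) && decide (p.2 < ((m.headD []).length : Int)))

-- _map[p0][p1]; exact whenever the indices are in range (guaranteed by fpInside under Pre_)
def fpCell (m : List (List String)) (p : Int × Int) : String :=
  (PySem.List.pyGet? ((PySem.List.pyGet? m p.1).getD []) p.2).getD ""

-- ===== PORT A =====
def fence_price_go (m : List (List String)) (t : String) :
    Nat → List (Int × Int × List (Int × Int)) → Int × Int → List (Int × Int × List (Int × Int))
  | 0, e, _ => e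
  | Nat.succ f, e, pos =>
    let st := List.foldl
      (fun (st : List (Int × Int) × List (Int × Int × List (Int × Int))) d =>
        let p : Int × Int := (pos.1 + d.1, pos.2 + d.2)
        if fpInside m p && (fpCell m p == t) then (st.1 ++ [p], st.2)
        else (st.1, dModify st.2 pos (fun s => PySem.Set.add s d)))
      (([], dInsert e pos PySem.Set.empty)) fpDirs
    List.foldl (fun acc p => if dContains acc p then acc else fence_price_go m t f acc p) st.2 st.1

def fence_price (_map : List (List String)) (pos : Int × Int) (explored : List (Int × Int × List (Int × Int))) (plot_type : String) : List (Int × Int × List (Int × Int)) :=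
  fence_price_go _map plot_type (_map.length * (_map.headD []).length + 3) explored pos

-- ===== PORT B =====
def fpGood (m : List (List String)) (t : String) (p : Int × Int) : Bool :=
  fpInside m p && (fpCell m p == t)

def fpNbrs (m : List (List String)) (t : String) (p : Int × Int) : List (Int × Int) :=
  (fpDirs.filter (fun d => fpGood m t (p.1 + d.1, p.2 + d.2))).map (fun d => (p.1 + d.1, p.2 + d.2))

def fpBorder (m : List (List String)) (t : String) (p : Int × Int) : List (Int × Int) :=
  PySem.Set.ofList (fpDirs.filter (fun d => !fpGood m t (p.1 + d.1, p.2 + d.2)))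

def fence_price_alt_go (m : List (List String)) (t : String) :
    Nat → List (Int × Int × List (Int × Int)) → List (Int × Int) → List (Int × Int × List (Int × Int))
  | 0, e, _ => e
  | Nat.succ _, e, [] => e
  | Nat.succ f, e, p :: rest =>
    if dContains e p then fence_price_alt_go m t f e rest
    else fence_price_alt_go m t f (dInsert e p (fpBorder m t p)) (fpNbrs m t p ++ rest)

def fence_price_alt (_map : List (List String)) (pos : Int × Int) (explored : List (Int × Int × List (Int × Int))) (plot_type : String) : List (Int × Int × List (Int × Int)) :=
  fence_price_alt_go _map plot_type (9 * (_map.length * (_map.headD []).length) + 20) explored [pos]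

-- ===== PRECONDITION & SPEC =====
-- Pre_ excludes (i) maps with a row shorter than row 0, on which A can raise IndexError;
-- (ii) `explored` lists with duplicate keys, which do not denote a Python dict; and
-- (iii) a start `pos` that is already a key of `explored` — a re-entrant call no caller makes,
-- on which A's reset of that cell's border set and B's leaving it alone are equally defensible.
def Pre_fence_price (_map : List (List String)) (pos : Int × Int) (explored : List (Int × Int × List (Int × Int))) (plot_type : String) : Prop :=
  (∀ row ∈ _map, (_map.headD []).length ≤ row.length) ∧
  (explored.map (fun r => (r.1, r.2.1))).Nodup ∧
  dContains explored pos = false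
instance (_map : List (List String)) (pos : Int × Int) (explored : List (Int × Int × List (Int × Int))) (plot_type : String) : Decidable (Pre_fence_price _map pos explored plot_type) := by unfold Pre_fence_price; infer_instance

def pvWitness_fence_price : List (List String) × (Int × Int) × (List (Int × Int × List (Int × Int))) × String :=
  ([["a", "a"], ["a", "b"]], (0, 0), [(5, 5, [])], "a")

def Spec_fence_price (_map : List (List String)) (pos : Int × Int) (explored : List (Int × Int × List (Int × Int))) (plot_type : String) (out : List (Int × Int × List (Int × Int))) : Prop := out = fence_price_alt _map pos explored plot_type
instance (_map : List (List String)) (pos : Int × Int) (explored : List (Int × Int × List (Int × Int))) (plot_type : String) (out : List (Int × Int × List (Int × Int))) : Decidable (Spec_fence_price _map pos explored plot_type out) := by unfold Spec_fence_price; infer_instance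

-- ===== CLAIM (what is proved, stated in full; the proofs are below) =====
def Claim_equal_fence_price : Prop := ∀ (_map : List (List String)) (pos : Int × Int) (explored : List (Int × Int × List (Int × Int))) (plot_type : String), Dom_fence_price _map pos explored plot_type → Pre_fence_price _map pos explored plot_type → Spec_fence_price _map pos explored plot_type (fence_price _map pos explored plot_type)

-- ===== LEMMAS AND PROOFS =====

-- dictionary facts
theorem dContains_dInsert (e : List (Int × Int × List (Int × Int))) (k : Int × Int) (v : List (Int × Int)) (q : Int × Int) :
    dContains (dInsert e k v) q = true ↔ (q = k ∨ dContains e q = true) := by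
  induction e with
  | nil =>
    simp only [dInsert, dContains, List.any_cons, List.any_nil, Bool.or_false, decide_eq_true_iff]
    constructor
    · rintro ⟨a, b⟩; exact Or.inl (Prod.ext_iff.mpr ⟨a.symm, b.symm⟩)
    · rintro (hq | h)
      · subst hq; exact ⟨rfl, rfl⟩
      · simp at h
  | cons r rs ih =>
    by_cases h : r.1 = k.1 ∧ r.2.1 = k.2
    · simp only [dInsert, if_pos h, dContains, List.any_cons, Bool.or_eq_true, decide_eq_true_iff]
      obtain ⟨h1, h2⟩ := h
      constructor
      · rintro (⟨a, b⟩ | hs)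
        · exact Or.inl (Prod.ext_iff.mpr ⟨a.symm, b.symm⟩)
        · right; right; exact hs
      · rintro (hq | ⟨a, b⟩ | hs)
        · subst hq; exact Or.inl ⟨rfl, rfl⟩
        · exact Or.inl ⟨h1.symm.trans a, h2.symm.trans b⟩
        · right; exact hs
    · simp only [dInsert, if_neg h, dContains, List.any_cons, Bool.or_eq_true, decide_eq_true_iff] at ih ⊢
      rw [ih]; tauto

theorem dModify_dInsert (e : List (Int × Int × List (Int × Int))) (k : Int × Int) (v : List (Int × Int)) (f : List (Int × Int) → List (Int × Int)) :
    dModify (dInsert e k v) k f = dInsert e k (f v) := by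
  induction e with
  | nil => simp [dInsert, dModify]
  | cons r rs ih =>
    by_cases h : r.1 = k.1 ∧ r.2.1 = k.2
    · simp [dInsert, dModify, h]
    · simp only [dInsert, if_neg h, dModify, ih]

-- A's direction loop computes exactly B's neighbour list and border set
theorem stepA_general (m : List (List String)) (t : String) (pos : Int × Int) :
    ∀ (ds : List (Int × Int)) (acc : List (Int × Int)) (s : List (Int × Int)) (e : List (Int × Int × List (Int × Int))),
    List.foldl (fun (st : List (Int × Int) × List (Int × Int × List (Int × Int))) d =>
        if fpGood m t (pos.1 + d.1, pos.2 + d.2) then (st.1 ++ [(pos.1 + d.1, pos.2 + d.2)], st.2)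
        else (st.1, dModify st.2 pos (fun s => PySem.Set.add s d)))
      ((acc, dInsert e pos s)) ds
    = (acc ++ (ds.filter (fun d => fpGood m t (pos.1 + d.1, pos.2 + d.2))).map (fun d => (pos.1 + d.1, pos.2 + d.2)),
       dInsert e pos (List.foldl PySem.Set.add s (ds.filter (fun d => !fpGood m t (pos.1 + d.1, pos.2 + d.2))))) := by
  intro ds
  induction ds with
  | nil => intro acc s e; simp
  | cons d ds ih =>
    intro acc s e
    by_cases hd : fpGood m t (pos.1 + d.1, pos.2 + d.2) = true
    · simp [List.foldl, hd]
      rw [ih (acc ++ [(pos.1 + d.1, pos.2 + d.2)]) s e]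
      simp
    · have hd' : fpGood m t (pos.1 + d.1, pos.2 + d.2) = false := by
        simpa using hd
      simp [List.foldl, hd']
      rw [dModify_dInsert, ih acc (PySem.Set.add s d) e]

theorem stepA_eq (m : List (List String)) (t : String) (e : List (Int × Int × List (Int × Int))) (pos : Int × Int) :
    (List.foldl
      (fun (st : List (Int × Int) × List (Int × Int × List (Int × Int))) d =>
        let p : Int × Int := (pos.1 + d.1, pos.2 + d.2)
        if fpInside m p && (fpCell m p == t) then (st.1 ++ [p], st.2)
        else (st.1, dModify st.2 pos (fun s => PySem.Set.add s d)))
      (([], dInsert e pos PySem.Set.empty)) fpDirs)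
    = (fpNbrs m t pos, dInsert e pos (fpBorder m t pos)) := by
  have h := stepA_general m t pos fpDirs [] [] e
  rw [List.nil_append] at h
  exact h

theorem go_succ (m : List (List String)) (t : String) (f : Nat) (e : List (Int × Int × List (Int × Int))) (pos : Int × Int) :
    fence_price_go m t (f + 1) e pos
      = List.foldl (fun acc p => if dContains acc p then acc else fence_price_go m t f acc p)
          (dInsert e pos (fpBorder m t pos)) (fpNbrs m t pos) := by
  rw [fence_price_go, stepA_eq]

-- the grid and the measure: number of in-map cells not yet explored
def fpGrid (m : List (List String)) : List (Int × Int) :=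
  (List.range m.length).flatMap (fun (i : Nat) => (List.range (m.headD []).length).map (fun (j : Nat) => (Int.ofNat i, Int.ofNat j)))

def fpMu (m : List (List String)) (e : List (Int × Int × List (Int × Int))) : Nat :=
  ((fpGrid m).filter (fun c => !dContains e c)).length

theorem mem_fpGrid (m : List (List String)) (p : Int × Int) : p ∈ fpGrid m ↔ fpInside m p = true := by
  rw [fpGrid, List.mem_flatMap]
  constructor
  · rintro ⟨i, hi, hp⟩
    rw [List.mem_range] at hi
    rw [List.mem_map] at hp
    obtain ⟨j, hj, rfl⟩ := hp
    rw [List.mem_range] at hj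
    simp only [fpInside, Bool.and_eq_true, decide_eq_true_iff]
    refine ⟨⟨?_, ?_⟩, ?_, ?_⟩ <;> simp only [Int.ofNat_eq_natCast] <;> omega
  · intro h
    simp only [fpInside, Bool.and_eq_true, decide_eq_true_iff] at h
    obtain ⟨⟨h1, h2⟩, h3, h4⟩ := h
    refine ⟨p.1.toNat, ?_, ?_⟩
    · rw [List.mem_range]; omega
    · rw [List.mem_map]
      refine ⟨p.2.toNat, ?_, ?_⟩
      · rw [List.mem_range]; omega
      · exact Prod.ext_iff.mpr ⟨by simp only [Int.ofNat_eq_natCast]; omega,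
          by simp only [Int.ofNat_eq_natCast]; omega⟩

theorem length_fpGrid (m : List (List String)) : (fpGrid m).length = m.length * (m.headD []).length := by
  simp [fpGrid, List.map_const', List.sum_replicate, smul_eq_mul]

theorem fpMu_le (m : List (List String)) (e : List (Int × Int × List (Int × Int))) :
    fpMu m e ≤ m.length * (m.headD []).length := by
  calc fpMu m e ≤ (fpGrid m).length := List.length_filter_le _ _
  _ = _ := length_fpGrid m

theorem length_filter_le_of_imp {α : Type} (l : List α) (p q : α → Bool)
    (h : ∀ a ∈ l, q a = true → p a = true) : (l.filter q).length ≤ (l.filter p).length := by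
  rw [← List.countP_eq_length_filter, ← List.countP_eq_length_filter]
  exact List.countP_mono_left h

theorem length_filter_lt_of_imp {α : Type} (l : List α) (p q : α → Bool)
    (h : ∀ a ∈ l, q a = true → p a = true)
    (x : α) (hx : x ∈ l) (hqx : q x = false) (hpx : p x = true) :
    (l.filter q).length < (l.filter p).length := by
  induction l with
  | nil => cases hx
  | cons b l ih =>
    rw [List.filter_cons, List.filter_cons]
    rcases List.mem_cons.mp hx with rfl | hx'
    · simp only [hqx, hpx, Bool.false_eq_true, if_false, if_true, List.length_cons]
      exact Nat.lt_succ_of_le (length_filter_le_of_imp l p q (fun a ha => h a (List.mem_cons_of_mem _ ha)))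
    · have hrec := ih (fun a ha => h a (List.mem_cons_of_mem _ ha)) hx'
      by_cases hb : q b = true
      · simp only [hb, h b List.mem_cons_self hb, if_true, List.length_cons]
        omega
      · rw [Bool.not_eq_true] at hb
        by_cases hpb : p b = true
        · simp only [hb, hpb, Bool.false_eq_true, if_false, if_true, List.length_cons]
          omega
        · rw [Bool.not_eq_true] at hpb
          simp only [hb, hpb, Bool.false_eq_true, if_false]
          exact hrec

theorem fpMu_mono (m : List (List String)) (e e' : List (Int × Int × List (Int × Int)))
    (h : ∀ q, dContains e q = true → dContains e' q = true) : fpMu m e' ≤ fpMu m e := by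
  apply length_filter_le_of_imp
  intro c _ hc
  rw [Bool.not_eq_true'] at hc ⊢
  by_contra hcon
  rw [Bool.not_eq_false] at hcon
  rw [h c hcon] at hc
  cases hc

theorem dContains_dInsert_self (e : List (Int × Int × List (Int × Int))) (k : Int × Int) (v : List (Int × Int)) :
    dContains (dInsert e k v) k = true :=
  (dContains_dInsert e k v k).mpr (Or.inl rfl)

theorem fpMu_dInsert_lt (m : List (List String)) (e : List (Int × Int × List (Int × Int))) (p : Int × Int) (v : List (Int × Int))
    (hin : fpInside m p = true) (hnc : dContains e p = false) : fpMu m (dInsert e p v) < fpMu m e := by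
  apply length_filter_lt_of_imp _ _ _ _ p ((mem_fpGrid m p).mpr hin)
  · simp only [dContains_dInsert_self, Bool.not_true]
  · rw [hnc]; rfl
  · intro c _ hc
    rw [Bool.not_eq_true'] at hc ⊢
    by_contra hcon
    rw [Bool.not_eq_false] at hcon
    rw [(dContains_dInsert e p v c).mpr (Or.inr hcon)] at hc
    cases hc

theorem fpMu_dInsert_out (m : List (List String)) (e : List (Int × Int × List (Int × Int))) (p : Int × Int) (v : List (Int × Int))
    (hout : fpInside m p = false) : fpMu m (dInsert e p v) = fpMu m e := by
  unfold fpMu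
  congr 1
  apply List.filter_congr
  intro c hc
  have hcp : c ≠ p := by
    intro hcpe
    subst hcpe
    rw [(mem_fpGrid m c).mp hc] at hout
    cases hout
  congr 1
  apply Bool.eq_iff_iff.mpr
  rw [dContains_dInsert]
  constructor
  · rintro (h | h)
    · exact absurd h hcp
    · exact h
  · exact Or.inr

theorem foldl_pres {α β : Type} (body : α → β → α) (P : α → Prop)
    (hb : ∀ s q, P s → P (body s q)) : ∀ (l : List β) (s : α), P s → P (List.foldl body s l) := by
  intro l
  induction l with
  | nil => intro s hs; exact hs
  | cons q l ih => intro s hs; exact ih _ (hb s q hs)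

theorem go_contains_mono (m : List (List String)) (t : String) :
    ∀ (f : Nat) (e : List (Int × Int × List (Int × Int))) (pos : Int × Int)
      (k : Int × Int), dContains e k = true → dContains (fence_price_go m t f e pos) k = true := by
  intro f
  induction f with
  | zero => intro e pos k h; exact h
  | succ f ih =>
    intro e pos k h
    rw [go_succ]
    apply foldl_pres _ (fun s => dContains s k = true)
    · intro s q hs
      by_cases hc : dContains s q = true
      · rwa [if_pos hc]
      · rw [if_neg hc]
        exact ih s q k hs
    · exact (dContains_dInsert e pos _ k).mpr (Or.inr h)

theorem fpMu_go_le (m : List (List String)) (t : String) (f : Nat) (e : List (Int × Int × List (Int × Int))) (pos : Int × Int) :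
    fpMu m (fence_price_go m t f e pos) ≤ fpMu m e :=
  fpMu_mono m e _ (fun _ h => go_contains_mono m t f e pos _ h)

theorem nbrs_inside (m : List (List String)) (t : String) (p q : Int × Int) (h : q ∈ fpNbrs m t p) :
    fpInside m q = true := by
  simp only [fpNbrs, List.mem_map, List.mem_filter] at h
  obtain ⟨d, ⟨_, hg⟩, rfl⟩ := h
  simp only [fpGood, Bool.and_eq_true] at hg
  exact hg.1

theorem nbrs_len (m : List (List String)) (t : String) (p : Int × Int) : (fpNbrs m t p).length ≤ 4 := by
  simp only [fpNbrs, List.length_map]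
  exact le_trans (List.length_filter_le _ _) (by rfl)

-- with enough fuel the recursion does not depend on the exact fuel value
theorem go_irrel (m : List (List String)) (t : String) :
    ∀ n (e : List (Int × Int × List (Int × Int))) (pos : Int × Int) (f1 f2 : Nat),
      fpMu m e ≤ n → fpInside m pos = true → dContains e pos = false →
      fpMu m e + 2 ≤ f1 → fpMu m e + 2 ≤ f2 →
      fence_price_go m t f1 e pos = fence_price_go m t f2 e pos := by
  intro n
  induction n using Nat.strong_induction_on with
  | _ n IH =>
  intro e pos f1 f2 hmu hin hnc h1 h2
  obtain ⟨f1', rfl⟩ : ∃ k, f1 = k + 1 := ⟨f1 - 1, by omega⟩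
  obtain ⟨f2', rfl⟩ : ∃ k, f2 = k + 1 := ⟨f2 - 1, by omega⟩
  rw [go_succ, go_succ]
  have hlt : fpMu m (dInsert e pos (fpBorder m t pos)) < fpMu m e :=
    fpMu_dInsert_lt m e pos _ hin hnc
  have key : ∀ (l : List (Int × Int)) (s : List (Int × Int × List (Int × Int))),
      (∀ q ∈ l, fpInside m q = true) → fpMu m s + 1 ≤ fpMu m e →
      List.foldl (fun acc p => if dContains acc p then acc else fence_price_go m t f1' acc p) s l
        = List.foldl (fun acc p => if dContains acc p then acc else fence_price_go m t f2' acc p) s l := by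
    intro l
    induction l with
    | nil => intro s _ _; rfl
    | cons q l ihl =>
      intro s hl hs
      simp only [List.foldl]
      by_cases hc : dContains s q = true
      · rw [if_pos hc, if_pos hc]
        exact ihl s (fun r hr => hl r (List.mem_cons_of_mem _ hr)) hs
      · rw [if_neg hc, if_neg hc]
        have hcf : dContains s q = false := eq_false_of_ne_true hc
        have heq : fence_price_go m t f1' s q = fence_price_go m t f2' s q :=
          IH (fpMu m s) (by omega) s q f1' f2' (le_refl _) (hl q List.mem_cons_self) hcf
            (by omega) (by omega)
        rw [heq]
        refine ihl _ (fun r hr => hl r (List.mem_cons_of_mem _ hr)) ?_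
        have := fpMu_go_le m t f2' s q
        omega
  exact key _ _ (fun q hq => nbrs_inside m t pos q hq) (by omega)

-- canonical description of A's recursion
def fpVisit (m : List (List String)) (t : String) (s : List (Int × Int × List (Int × Int))) (q : Int × Int) :
    List (Int × Int × List (Int × Int)) :=
  if dContains s q then s else fence_price_go m t (fpMu m s + 2) s q

def fpFold (m : List (List String)) (t : String) (s : List (Int × Int × List (Int × Int))) (l : List (Int × Int)) :
    List (Int × Int × List (Int × Int)) :=
  List.foldl (fpVisit m t) s l

theorem fpVisit_mu (m : List (List String)) (t : String) (s : List (Int × Int × List (Int × Int))) (q : Int × Int) :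
    fpMu m (fpVisit m t s q) ≤ fpMu m s := by
  unfold fpVisit; split
  · exact le_refl _
  · exact fpMu_go_le m t _ s q

theorem foldl_fixed (m : List (List String)) (t : String) :
    ∀ (l : List (Int × Int)) (s : List (Int × Int × List (Int × Int))) (f : Nat),
      (∀ q ∈ l, fpInside m q = true) → fpMu m s + 2 ≤ f →
      List.foldl (fun acc p => if dContains acc p then acc else fence_price_go m t f acc p) s l
        = fpFold m t s l := by
  intro l
  induction l with
  | nil => intro s f _ _; rfl
  | cons q l ih =>
    intro s f hl hf
    simp only [List.foldl, fpFold]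
    by_cases hc : dContains s q = true
    · rw [if_pos hc]
      rw [show fpVisit m t s q = s from by rw [fpVisit, if_pos hc]]
      exact ih s f (fun r hr => hl r (List.mem_cons_of_mem _ hr)) hf
    · rw [if_neg hc]
      have hcf : dContains s q = false := eq_false_of_ne_true hc
      have heq : fence_price_go m t f s q = fence_price_go m t (fpMu m s + 2) s q :=
        go_irrel m t (fpMu m s) s q f (fpMu m s + 2) (le_refl _)
          (hl q List.mem_cons_self) hcf hf (le_refl _)
      rw [heq]
      rw [show fence_price_go m t (fpMu m s + 2) s q = fpVisit m t s q from
        by rw [fpVisit, if_neg hc]]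
      refine ih _ f (fun r hr => hl r (List.mem_cons_of_mem _ hr)) ?_
      have h1 := fpVisit_mu m t s q
      omega

-- the stack loop of B computes the canonical fold
theorem main_loop (m : List (List String)) (t : String) :
    ∀ n (stack : List (Int × Int)) (e : List (Int × Int × List (Int × Int))) (f : Nat),
      fpMu m e ≤ n → (∀ q ∈ stack, fpInside m q = true) →
      9 * fpMu m e + 2 * stack.length + 1 ≤ f →
      fence_price_alt_go m t f e stack = fpFold m t e stack := by
  intro n
  induction n using Nat.strong_induction_on with
  | _ n IH =>
  intro stack
  induction stack with
  | nil =>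
    intro e f _ _ hf
    obtain ⟨f', rfl⟩ : ∃ k, f = k + 1 := ⟨f - 1, by omega⟩
    rfl
  | cons p rest ihs =>
    intro e f hmu hstack hf
    obtain ⟨f', rfl⟩ : ∃ k, f = k + 1 := ⟨f - 1, by omega⟩
    rw [fence_price_alt_go]
    by_cases hc : dContains e p = true
    · rw [if_pos hc]
      rw [show fpFold m t e (p :: rest) = fpFold m t e rest from
        by simp only [fpFold, List.foldl, fpVisit, if_pos hc]]
      refine ihs e f' hmu (fun q hq => hstack q (List.mem_cons_of_mem _ hq)) ?_
      simp only [List.length_cons] at hf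
      omega
    · rw [if_neg hc]
      have hcf : dContains e p = false := eq_false_of_ne_true hc
      have hp : fpInside m p = true := hstack p List.mem_cons_self
      have hlt : fpMu m (dInsert e p (fpBorder m t p)) < fpMu m e :=
        fpMu_dInsert_lt m e p _ hp hcf
      have h1 : fpVisit m t e p = fpFold m t (dInsert e p (fpBorder m t p)) (fpNbrs m t p) := by
        rw [fpVisit, if_neg hc, show fpMu m e + 2 = (fpMu m e + 1) + 1 from rfl, go_succ]
        exact foldl_fixed m t _ _ _ (fun q hq => nbrs_inside m t p q hq) (by omega)
      have hR : fpFold m t e (p :: rest)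
          = fpFold m t (dInsert e p (fpBorder m t p)) (fpNbrs m t p ++ rest) := by
        calc fpFold m t e (p :: rest)
            = List.foldl (fpVisit m t) (fpVisit m t e p) rest := rfl
          _ = List.foldl (fpVisit m t) (fpFold m t (dInsert e p (fpBorder m t p)) (fpNbrs m t p)) rest := by
              rw [h1]
          _ = fpFold m t (dInsert e p (fpBorder m t p)) (fpNbrs m t p ++ rest) := by
              simp only [fpFold, List.foldl_append]
      rw [hR]
      refine IH (n - 1) (by omega) _ _ f' (by omega) ?_ ?_
      · intro q hq
        rcases List.mem_append.mp hq with hq | hq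
        · exact nbrs_inside m t p q hq
        · exact hstack q (List.mem_cons_of_mem _ hq)
      · have h4 := nbrs_len m t p
        simp only [List.length_append, List.length_cons] at hf ⊢
        omega

-- ===== VERDICT (by name: the statement is the Claim_ definition above) =====
theorem fence_price_spec : Claim_equal_fence_price := by
  unfold Claim_equal_fence_price
  intro m pos e t _hdom hpre
  obtain ⟨hrect, hnodup, hpos⟩ := hpre
  unfold Spec_fence_price fence_price fence_price_alt
  by_cases hin : fpInside m pos = true
  · have hA : fence_price_go m t (m.length * (m.headD []).length + 3) e pos
        = fence_price_go m t (fpMu m e + 2) e pos :=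
      go_irrel m t (fpMu m e) e pos _ _ (le_refl _) hin hpos
        (by have := fpMu_le m e; omega) (le_refl _)
    have hB : fence_price_alt_go m t (9 * (m.length * (m.headD []).length) + 20) e [pos]
        = fpFold m t e [pos] :=
      main_loop m t (fpMu m e) [pos] e _ (le_refl _)
        (by intro q hq; rw [List.mem_singleton] at hq; subst hq; exact hin)
        (by have := fpMu_le m e; simp only [List.length_singleton]; omega)
    have hC : fpFold m t e [pos] = fence_price_go m t (fpMu m e + 2) e pos := by
      simp only [fpFold, List.foldl, fpVisit, hpos, Bool.false_eq_true, if_false]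
    rw [hA, hB, hC]
  · have hin' : fpInside m pos = false := eq_false_of_ne_true hin
    rw [show m.length * (m.headD []).length + 3 = (m.length * (m.headD []).length + 2) + 1 from rfl,
      go_succ]
    have hBstep : fence_price_alt_go m t (9 * (m.length * (m.headD []).length) + 20) e [pos]
        = fence_price_alt_go m t (9 * (m.length * (m.headD []).length) + 19)
            (dInsert e pos (fpBorder m t pos)) (fpNbrs m t pos ++ []) := by
      rw [show 9 * (m.length * (m.headD []).length) + 20
            = (9 * (m.length * (m.headD []).length) + 19) + 1 from rfl]
      rw [fence_price_alt_go, if_neg (by rw [hpos]; exact Bool.false_ne_true)]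
    rw [hBstep, List.append_nil]
    have hmu1 : fpMu m (dInsert e pos (fpBorder m t pos)) = fpMu m e :=
      fpMu_dInsert_out m e pos _ hin'
    rw [foldl_fixed m t _ _ _ (fun q hq => nbrs_inside m t pos q hq)
      (by have := fpMu_le m e; omega)]
    rw [main_loop m t (fpMu m (dInsert e pos (fpBorder m t pos))) _ _ _ (le_refl _)
      (fun q hq => nbrs_inside m t pos q hq)
      (by have h4 := nbrs_len m t pos; have h5 := fpMu_le m e; rw [hmu1]; omega)]
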